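-- pv_equiv track=rewrite | github.com/eduardosavian/graphs-dps-and-bfs | src/utils.py | create_graph_matrix
-- ===== SOURCE A (Python) =====
-- def create_graph_matrix(matrix: list) -> list:
--     graph = []
--     charss = []
--
--     for row in matrix:
--         for col in row:
--             if col not in charss:
--                 charss.append(col)
--
--     charss = sorted(set(charss))
--     for i in range(len(charss)):
--         row = []
--         for j in range(len(charss)):
--             if i == j:
--                 row.append('X')
--             else:
--                 row.append('0')
--         graph.append(row)
--
--     for row in matrix:
--         for i in range(len(row)):
--             for j in range(len(row)):
--                 if row[i] != row[j]:
--                     graph[charss.index(row[i])][charss.index(row[j])] = '1'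
--     return graph
-- ===== SOURCE B (Python) =====
-- def create_graph_matrix(matrix: list) -> list:
--     edges = {(a, b) for row in matrix for a in row for b in row if a != b}
--     chars = sorted({c for row in matrix for c in row})
--     return [['X' if a == b else ('1' if (a, b) in edges else '0') for b in chars]
--             for a in chars]
-- ===== Notes on version B (the rewrite author's own statement) =====
-- stated objective: simpler
-- what changed: A builds an 'X'/'0' matrix and then mutates cells to '1' in a triple nested index loop with repeated charss.index list scans; B precomputes a co-occurrence edge set and the sorted character list once and builds the matrix directly in one nested comprehension with no mutation.
import Mathlib
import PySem

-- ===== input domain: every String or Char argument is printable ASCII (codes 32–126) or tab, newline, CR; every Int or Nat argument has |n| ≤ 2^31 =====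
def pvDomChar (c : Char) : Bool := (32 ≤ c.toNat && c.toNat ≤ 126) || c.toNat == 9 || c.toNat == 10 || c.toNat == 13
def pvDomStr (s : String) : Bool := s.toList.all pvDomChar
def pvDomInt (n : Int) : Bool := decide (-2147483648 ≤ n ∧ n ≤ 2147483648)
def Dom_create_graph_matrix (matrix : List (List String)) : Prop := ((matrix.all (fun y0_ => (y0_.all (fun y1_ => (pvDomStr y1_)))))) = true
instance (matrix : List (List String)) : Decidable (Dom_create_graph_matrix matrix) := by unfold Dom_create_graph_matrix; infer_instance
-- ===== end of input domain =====

-- B replaces A's init-then-mutate triple index loops (with repeated list.index scans) by a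
-- precomputed co-occurrence edge set and a direct nested comprehension (objective: simpler).

-- ===== PORT A =====
-- graph[p][q] = '1' (indices produced by charss.index, always in range here)
def pvStep (g : List (List String)) (u : Nat × Nat) : List (List String) :=
  g.set u.1 ((g.getD u.1 []).set u.2 "1")

def create_graph_matrix (matrix : List (List String)) : List (List String) :=
  let charss0 := matrix.foldl (fun cs row =>
    row.foldl (fun cs col => if cs.contains col then cs else cs ++ [col]) cs) []
  let charss := PySem.List.sorted (PySem.Set.ofList charss0) (fun x => x) false
  let graph := (List.range charss.length).map (fun i =>
    (List.range charss.length).map (fun j => if i = j then "X" else "0"))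
  -- charss.index never raises here (every row element is in charss), so `.getD 0` is exact
  matrix.foldl (fun g row =>
    (List.range row.length).foldl (fun g i =>
      (List.range row.length).foldl (fun g j =>
        if row.getD i "" ≠ row.getD j "" then
          pvStep g ((PySem.List.index? charss (row.getD i "")).getD 0,
                    (PySem.List.index? charss (row.getD j "")).getD 0)
        else g) g) g) graph

-- ===== PORT B =====
def create_graph_matrix_alt (matrix : List (List String)) : List (List String) :=
  let edges : PySem.Set (String × String) :=
    PySem.Set.ofList (matrix.flatMap (fun row =>
      row.flatMap (fun a => row.filterMap (fun b => if a ≠ b then some (a, b) else none))))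
  let chars := PySem.List.sorted (PySem.Set.ofList (matrix.flatMap (fun row => row))) (fun x => x) false
  chars.map (fun a => chars.map (fun b =>
    if a = b then "X" else if PySem.Set.contains edges (a, b) then "1" else "0"))

-- ===== PRECONDITION & SPEC =====
def Spec_create_graph_matrix (matrix : List (List String)) (out : List (List String)) : Prop := out = create_graph_matrix_alt matrix
instance (matrix : List (List String)) (out : List (List String)) : Decidable (Spec_create_graph_matrix matrix out) := by unfold Spec_create_graph_matrix; infer_instance

-- ===== CLAIM (what is proved, stated in full; the proofs are below) =====
def Claim_equal_create_graph_matrix : Prop := ∀ (matrix : List (List String)), Dom_create_graph_matrix matrix → Spec_create_graph_matrix matrix (create_graph_matrix matrix)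

-- ===== LEMMAS AND PROOFS =====

def pvGet2 (g : List (List String)) (i j : Nat) : String := (g.getD i []).getD j ""

def pvFlat (m : List (List String)) : List String := m.flatMap (fun row => row)

def pvChars (m : List (List String)) : List String :=
  PySem.List.sorted (PySem.Set.ofList (pvFlat m)) (fun x => x) false

def pvIdx (chars : List String) (a : String) : Nat := (PySem.List.index? chars a).getD 0

def pvInit (n : Nat) : List (List String) :=
  (List.range n).map (fun i => (List.range n).map (fun j => if i = j then "X" else "0"))

def pvU (m : List (List String)) (chars : List String) : List (Nat × Nat) :=
  m.flatMap (fun row => (List.range row.length).flatMap (fun i =>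
    (List.range row.length).filterMap (fun j =>
      if row.getD i "" ≠ row.getD j "" then
        some (pvIdx chars (row.getD i ""), pvIdx chars (row.getD j "")) else none)))

def pvPairs (m : List (List String)) : List (String × String) :=
  m.flatMap (fun row =>
    row.flatMap (fun a => row.filterMap (fun b => if a ≠ b then some (a, b) else none)))

lemma pvGetD_set {α : Type} (l : List α) (p i : Nat) (x d : α) :
    (l.set p x).getD i d = if i = p ∧ p < l.length then x else l.getD i d := by
  simp only [List.getD_eq_getElem?_getD, List.getElem?_set]
  by_cases hip : p = i
  · subst hip
    by_cases hl : p < l.length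
    · simp [hl]
    · simp [hl]
  · have h2 : ¬ (i = p) := fun h => hip h.symm
    simp [hip, h2]

lemma length_pvStep (g : List (List String)) (u : Nat × Nat) :
    (pvStep g u).length = g.length := by simp [pvStep]

lemma getD_pvStep (g : List (List String)) (p q i : Nat) :
    (pvStep g (p, q)).getD i [] =
      if i = p ∧ p < g.length then (g.getD p []).set q "1" else g.getD i [] :=
  pvGetD_set g p i ((g.getD p []).set q "1") []

lemma rowlen_pvStep (g : List (List String)) (u : Nat × Nat) (i : Nat) :
    ((pvStep g u).getD i []).length = (g.getD i []).length := by
  obtain ⟨p, q⟩ := u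
  rw [getD_pvStep]
  split
  · rename_i h; rw [h.1]; simp
  · rfl

lemma get2_pvStep (g : List (List String)) (p q i j : Nat) :
    pvGet2 (pvStep g (p, q)) i j =
      if i = p ∧ j = q ∧ p < g.length ∧ q < (g.getD p []).length then "1"
      else pvGet2 g i j := by
  unfold pvGet2
  rw [getD_pvStep]
  by_cases hip : i = p ∧ p < g.length
  · obtain ⟨rfl, hlen⟩ := hip
    rw [if_pos ⟨rfl, hlen⟩, pvGetD_set]
    by_cases hjq : j = q ∧ q < (g.getD i []).length
    · rw [if_pos hjq, if_pos ⟨rfl, hjq.1, hlen, hjq.2⟩]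
    · rw [if_neg hjq, if_neg (fun h => hjq ⟨h.2.1, h.2.2.2⟩)]
  · rw [if_neg hip, if_neg (fun h => hip ⟨h.1, h.2.2.1⟩)]

lemma length_foldl_pvStep (U : List (Nat × Nat)) (g : List (List String)) :
    (U.foldl pvStep g).length = g.length := by
  induction U generalizing g with
  | nil => rfl
  | cons u U ih => rw [List.foldl_cons, ih, length_pvStep]

lemma rowlen_foldl_pvStep (U : List (Nat × Nat)) (g : List (List String)) (i : Nat) :
    ((U.foldl pvStep g).getD i []).length = (g.getD i []).length := by
  induction U generalizing g with
  | nil => rfl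
  | cons u U ih => rw [List.foldl_cons, ih, rowlen_pvStep]

lemma get2_foldl_pvStep (U : List (Nat × Nat)) (g : List (List String)) (i j : Nat) :
    pvGet2 (U.foldl pvStep g) i j =
      if (i, j) ∈ U ∧ i < g.length ∧ j < (g.getD i []).length then "1"
      else pvGet2 g i j := by
  induction U generalizing g with
  | nil => simp
  | cons u U ih =>
    obtain ⟨p, q⟩ := u
    rw [List.foldl_cons, ih, length_pvStep, rowlen_pvStep, get2_pvStep]
    by_cases hB : i < g.length ∧ j < (g.getD i []).length
    · by_cases hm : (i, j) ∈ U
      · rw [if_pos ⟨hm, hB⟩, if_pos ⟨List.mem_cons_of_mem _ hm, hB⟩]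
      · rw [if_neg (fun h => hm h.1)]
        by_cases hd : i = p ∧ j = q
        · obtain ⟨rfl, rfl⟩ := hd
          rw [if_pos ⟨rfl, rfl, hB.1, hB.2⟩, if_pos ⟨List.mem_cons_self, hB⟩]
        · rw [if_neg (fun h => hd ⟨h.1, h.2.1⟩)]
          rw [if_neg (fun h => by
            rcases List.mem_cons.mp h.1 with he | hmem
            · exact hd ⟨(Prod.ext_iff.mp he).1, (Prod.ext_iff.mp he).2⟩
            · exact hm hmem)]
    · rw [if_neg (fun h => hB h.2),
          if_neg (fun h => by obtain ⟨rfl, rfl, h3, h4⟩ := h; exact hB ⟨h3, h4⟩),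
          if_neg (fun h => hB h.2)]

lemma foldl_foldl_flatMap {a b c : Type} (step : c → b → c) (f : a → List b)
    (l : List a) (init : c) :
    l.foldl (fun acc x => (f x).foldl step acc) init = (l.flatMap f).foldl step init := by
  induction l generalizing init with
  | nil => rfl
  | cons x xs ih => simp [List.flatMap_cons, List.foldl_append, ih]

lemma foldl_ite_filterMap {a c : Type} (cond : a → Prop) [DecidablePred cond]
    (u : a → Nat × Nat) (step : c → Nat × Nat → c) (l : List a) (init : c) :
    l.foldl (fun g x => if cond x then step g (u x) else g) init
      = (l.filterMap (fun x => if cond x then some (u x) else none)).foldl step init := by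
  induction l generalizing init with
  | nil => rfl
  | cons x xs ih =>
    simp only [List.foldl_cons, List.filterMap_cons]
    split <;> simp [ih]

lemma ofList_eq_self_of_nodup {a : Type} [BEq a] [LawfulBEq a] (l : List a) (h : l.Nodup) :
    PySem.Set.ofList l = l := by
  have key : ∀ (l : List a) (s : List a), l.Nodup → (∀ x ∈ l, x ∉ s) →
      l.foldl PySem.Set.add s = s ++ l := by
    intro l
    induction l with
    | nil => intro s _ _; simp
    | cons x xs ih =>
      intro s hnd hdisj
      have hx : x ∉ s := hdisj x (by simp)
      have hadd : PySem.Set.add s x = s ++ [x] := by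
        simp [PySem.Set.add, List.contains_eq_mem, hx]
      rw [List.foldl_cons, hadd, ih (s ++ [x]) (List.Nodup.of_cons hnd)]
      · simp
      · intro y hy
        simp only [List.mem_append, List.mem_singleton]
        rintro (hs | rfl)
        · exact hdisj y (by simp [hy]) hs
        · exact (List.nodup_cons.mp hnd).1 hy
  rw [PySem.Set.ofList_eq_foldl]
  simpa using key l [] h (by simp)

lemma ofList_idem (l : List String) :
    PySem.Set.ofList (PySem.Set.ofList l) = PySem.Set.ofList l :=
  ofList_eq_self_of_nodup _ (PySem.Set.nodup_ofList l)

lemma charss0_eq (matrix : List (List String)) :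
    matrix.foldl (fun cs row =>
        row.foldl (fun cs col => if cs.contains col then cs else cs ++ [col]) cs) []
      = PySem.Set.ofList (matrix.flatMap (fun row => row)) := by
  have hstep : ∀ (cs : List String) (col : String),
      (if cs.contains col then cs else cs ++ [col]) = PySem.Set.add cs col := by
    intro cs col; rfl
  simp only [hstep]
  rw [foldl_foldl_flatMap PySem.Set.add (fun row => row) matrix []]
  rw [PySem.Set.ofList_eq_foldl]

lemma A_unfold (m : List (List String)) :
    create_graph_matrix m = (pvU m (pvChars m)).foldl pvStep (pvInit (pvChars m).length) := by
  simp only [create_graph_matrix, charss0_eq, ofList_idem]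
  simp only [foldl_ite_filterMap]
  simp only [foldl_foldl_flatMap]
  simp only [pvU, pvChars, pvInit, pvIdx, pvFlat]

lemma B_unfold (m : List (List String)) :
    create_graph_matrix_alt m = (pvChars m).map (fun a => (pvChars m).map (fun b =>
      if a = b then "X"
      else if PySem.Set.contains (PySem.Set.ofList (pvPairs m)) (a, b) then "1" else "0")) := rfl

lemma mem_pvPairs (m : List (List String)) (a b : String) :
    (a, b) ∈ pvPairs m ↔ ∃ row ∈ m, a ∈ row ∧ b ∈ row ∧ a ≠ b := by
  simp only [pvPairs, List.mem_flatMap, List.mem_filterMap]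
  constructor
  · rintro ⟨row, hrow, x, hx, y, hy, hsome⟩
    by_cases hxy : x ≠ y
    · rw [if_pos hxy, Option.some.injEq, Prod.mk.injEq] at hsome
      obtain ⟨rfl, rfl⟩ := hsome
      exact ⟨row, hrow, hx, hy, hxy⟩
    · rw [if_neg hxy] at hsome; simp at hsome
  · rintro ⟨row, hrow, ha, hb, hne⟩
    exact ⟨row, hrow, a, ha, b, hb, by rw [if_pos hne]⟩

lemma mem_pvU (m : List (List String)) (chars : List String) (p q : Nat) :
    (p, q) ∈ pvU m chars ↔
      ∃ row ∈ m, ∃ a ∈ row, ∃ b ∈ row, a ≠ b ∧ p = pvIdx chars a ∧ q = pvIdx chars b := by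
  simp only [pvU, List.mem_flatMap, List.mem_range, List.mem_filterMap]
  constructor
  · rintro ⟨row, hrow, i, hi, j, hj, hsome⟩
    by_cases hne : row.getD i "" ≠ row.getD j ""
    · rw [if_pos hne, Option.some.injEq, Prod.mk.injEq] at hsome
      obtain ⟨h1, h2⟩ := hsome
      refine ⟨row, hrow, row.getD i "", ?_, row.getD j "", ?_, hne, h1.symm, h2.symm⟩
      · rw [List.getD_eq_getElem _ _ hi]; exact List.getElem_mem _
      · rw [List.getD_eq_getElem _ _ hj]; exact List.getElem_mem _
    · rw [if_neg hne] at hsome; simp at hsome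
  · rintro ⟨row, hrow, a, ha, b, hb, hne, rfl, rfl⟩
    obtain ⟨i, hi, rfl⟩ := List.mem_iff_getElem.mp ha
    obtain ⟨j, hj, rfl⟩ := List.mem_iff_getElem.mp hb
    refine ⟨row, hrow, i, hi, j, hj, ?_⟩
    rw [List.getD_eq_getElem _ _ hi, List.getD_eq_getElem _ _ hj, if_pos hne]

lemma nodup_pvChars (m : List (List String)) : (pvChars m).Nodup :=
  ((PySem.List.sorted_perm (PySem.Set.ofList (pvFlat m)) (fun x => x) false).nodup_iff).mpr
    (PySem.Set.nodup_ofList _)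

lemma mem_pvChars (m : List (List String)) (a : String) :
    a ∈ pvChars m ↔ ∃ row ∈ m, a ∈ row := by
  simp [pvChars, PySem.List.mem_sorted, PySem.Set.mem_ofList, pvFlat]

lemma pvIdx_lt_getElem (chars : List String) (a : String) (ha : a ∈ chars) :
    ∃ h : pvIdx chars a < chars.length, chars[pvIdx chars a] = a := by
  obtain ⟨k, hk⟩ := Option.isSome_iff_exists.mp ((PySem.List.index?_isSome_iff chars a).mpr ha)
  obtain ⟨hlt, hval, _⟩ := PySem.List.getElem_of_index?_eq_some hk
  unfold pvIdx
  rw [hk]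
  exact ⟨hlt, hval⟩

lemma pvIdx_getElem (chars : List String) (hnd : chars.Nodup) (p : Nat) (hp : p < chars.length) :
    pvIdx chars chars[p] = p := by
  obtain ⟨hlt, hval⟩ := pvIdx_lt_getElem chars chars[p] (List.getElem_mem _)
  exact (hnd.getElem_inj_iff (hi := hlt) (hj := hp)).mp hval

lemma length_pvInit (n : Nat) : (pvInit n).length = n := by simp [pvInit]

lemma getD_pvInit (n p : Nat) (hp : p < n) :
    (pvInit n).getD p [] = (List.range n).map (fun j => if p = j then "X" else "0") := by
  unfold pvInit
  rw [List.getD_eq_getElem _ _ (by simpa using hp), List.getElem_map, List.getElem_range]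

lemma rowlen_pvInit (n p : Nat) (hp : p < n) : ((pvInit n).getD p []).length = n := by
  rw [getD_pvInit n p hp]; simp

lemma get2_pvInit (n p q : Nat) (hp : p < n) (hq : q < n) :
    pvGet2 (pvInit n) p q = if p = q then "X" else "0" := by
  unfold pvGet2
  rw [getD_pvInit n p hp, List.getD_eq_getElem _ _ (by simpa using hq),
      List.getElem_map, List.getElem_range]

-- ===== VERDICT (by name: the statement is the Claim_ definition above) =====
theorem create_graph_matrix_spec : Claim_equal_create_graph_matrix := by
  intro m _dom
  show create_graph_matrix m = create_graph_matrix_alt m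
  rw [A_unfold, B_unfold]
  have hnd : (pvChars m).Nodup := nodup_pvChars m
  apply List.ext_getElem
  · rw [length_foldl_pvStep, length_pvInit, List.length_map]
  · intro p h1 h2
    have hp : p < (pvChars m).length := by
      rw [length_foldl_pvStep, length_pvInit] at h1; exact h1
    have hrow_eq : ((pvU m (pvChars m)).foldl pvStep (pvInit (pvChars m).length)).getD p []
        = ((pvU m (pvChars m)).foldl pvStep (pvInit (pvChars m).length))[p] :=
      List.getD_eq_getElem _ _ h1
    apply List.ext_getElem
    · rw [← hrow_eq, rowlen_foldl_pvStep, rowlen_pvInit _ p hp, List.getElem_map,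
        List.length_map]
    · intro q h3 h4
      have hq : q < (pvChars m).length := by
        rw [List.getElem_map, List.length_map] at h4; exact h4
      have hL : pvGet2 ((pvU m (pvChars m)).foldl pvStep (pvInit (pvChars m).length)) p q
          = (((pvU m (pvChars m)).foldl pvStep (pvInit (pvChars m).length))[p])[q] := by
        unfold pvGet2
        rw [hrow_eq]
        exact List.getD_eq_getElem _ _ h3
      rw [← hL, get2_foldl_pvStep, length_pvInit, rowlen_pvInit _ p hp,
        get2_pvInit _ p q hp hq]
      simp only [List.getElem_map]
      by_cases hpq : p = q
      · subst hpq
        have hdiag : ¬ ((p, p) ∈ pvU m (pvChars m) ∧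
            p < (pvChars m).length ∧ p < (pvChars m).length) := by
          rintro ⟨hmem, -⟩
          obtain ⟨row, hrow, a, ha, b, hb, hne, hpa, hpb⟩ := (mem_pvU m (pvChars m) p p).mp hmem
          obtain ⟨hlta, hvala⟩ := pvIdx_lt_getElem (pvChars m) a
            ((mem_pvChars m a).mpr ⟨row, hrow, ha⟩)
          obtain ⟨hltb, hvalb⟩ := pvIdx_lt_getElem (pvChars m) b
            ((mem_pvChars m b).mpr ⟨row, hrow, hb⟩)
          have ha' : (pvChars m)[pvIdx (pvChars m) a]? = some a := by
            rw [List.getElem?_eq_getElem hlta, hvala]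
          have hb' : (pvChars m)[pvIdx (pvChars m) b]? = some b := by
            rw [List.getElem?_eq_getElem hltb, hvalb]
          have hidx : pvIdx (pvChars m) a = pvIdx (pvChars m) b := by rw [← hpa, ← hpb]
          rw [hidx] at ha'
          exact hne (Option.some.inj (ha'.symm.trans hb'))
        rw [if_neg hdiag]
        simp
      · have hneq : (pvChars m)[p] ≠ (pvChars m)[q] := fun h =>
          hpq ((hnd.getElem_inj_iff (hi := hp) (hj := hq)).mp h)
        rw [if_neg hneq]
        have hiff : (p, q) ∈ pvU m (pvChars m) ↔
            PySem.Set.contains (PySem.Set.ofList (pvPairs m)) ((pvChars m)[p], (pvChars m)[q])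
              = true := by
          rw [PySem.Set.contains_iff, PySem.Set.mem_ofList, mem_pvPairs,
            mem_pvU]
          constructor
          · rintro ⟨row, hrow, a, ha, b, hb, hne, rfl, rfl⟩
            obtain ⟨hlta, hvala⟩ := pvIdx_lt_getElem (pvChars m) a
              ((mem_pvChars m a).mpr ⟨row, hrow, ha⟩)
            obtain ⟨hltb, hvalb⟩ := pvIdx_lt_getElem (pvChars m) b
              ((mem_pvChars m b).mpr ⟨row, hrow, hb⟩)
            exact ⟨row, hrow, hvala.symm ▸ ha, hvalb.symm ▸ hb,
              by rw [hvala, hvalb]; exact hne⟩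
          · rintro ⟨row, hrow, ha, hb, hne⟩
            exact ⟨row, hrow, (pvChars m)[p], ha, (pvChars m)[q], hb, hne,
              (pvIdx_getElem (pvChars m) hnd p hp).symm,
              (pvIdx_getElem (pvChars m) hnd q hq).symm⟩
        by_cases hmem : (p, q) ∈ pvU m (pvChars m)
        · rw [if_pos ⟨hmem, hp, hq⟩, if_pos (hiff.mp hmem)]
        · rw [if_neg (fun h => hmem h.1), if_neg (fun hc => hmem (hiff.mpr hc)), if_neg hpq]
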